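-- pv_equiv track=rewrite | github.com/niru207/CSA1564-CRYPTOGRAPHY-AND-NETWORK-SECURITY | 29) Mono alphabetic cipher.py | frequency_attack
-- ===== SOURCE A (Python) =====
-- import string
-- from collections import Counter
--
-- ENGLISH_FREQ = 'etaoinshrdlcumwfgypbvkjxqz'
--
-- def calculate_frequency(text):
--     # Count occurrences of each letter
--     text = text.lower()
--     letter_counts = Counter([char for char in text if char in string.ascii_lowercase])
--
--     # Sort letters by frequency, highest first
--     sorted_letters = [pair[0] for pair in letter_counts.most_common()]
--     return ''.join(sorted_letters)
--
-- def decrypt_with_key(ciphertext, key_map):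
--     decrypted_text = []
--     for char in ciphertext:
--         if char.isalpha():
--             if char.islower():
--                 decrypted_text.append(key_map.get(char, char))
--             else:
--                 decrypted_text.append(key_map.get(char.lower(), char).upper())
--         else:
--             decrypted_text.append(char)  # Non-alphabetic characters remain unchanged
--     return ''.join(decrypted_text)
--
-- def frequency_attack(ciphertext, top_n):
--     ciphertext_freq = calculate_frequency(ciphertext)
--
--     # Generate top possible plaintexts
--     possible_plaintexts = []
--     for i in range(top_n):
--         # Create a key map based on frequency mapping
--         key_map = {ciphertext_freq[j]: ENGLISH_FREQ[(j + i) % 26] for j in range(len(ciphertext_freq))}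
--
--         # Decrypt the ciphertext using the generated key map
--         possible_plaintext = decrypt_with_key(ciphertext, key_map)
--         possible_plaintexts.append(possible_plaintext)
--
--     return possible_plaintexts
-- ===== SOURCE B (Python) =====
-- import string
-- from collections import Counter
--
-- ENGLISH_FREQ = 'etaoinshrdlcumwfgypbvkjxqz'
--
--
-- def frequency_attack(ciphertext, top_n):
--     # Decode rotation 0 once with str.translate, then derive each further candidate
--     # from the previous one by a single fixed successor substitution.
--     counts = Counter([c for c in ciphertext.lower() if c in string.ascii_lowercase])
--     freq = ''.join(c for c, _ in counts.most_common())
--     low = ENGLISH_FREQ[:len(freq)]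
--     cur = ciphertext.translate(str.maketrans(freq + freq.upper(), low + low.upper()))
--     rot = ENGLISH_FREQ[1:] + ENGLISH_FREQ[0]
--     succ = str.maketrans(ENGLISH_FREQ + ENGLISH_FREQ.upper(), rot + rot.upper())
--     candidates = []
--     for _ in range(top_n):
--         candidates.append(cur)
--         cur = cur.translate(succ)
--     return candidates
-- ===== Notes on version B (the rewrite author's own statement) =====
-- stated objective: faster
-- what changed: B decodes only the frequency-rank-0 candidate (via one str.translate table) and then derives each further candidate incrementally from the PREVIOUS plaintext by a single fixed successor substitution along ENGLISH_FREQ, instead of rebuilding a key_map dict and re-decoding the ciphertext from scratch for every rotation; correct because shifting the English ranking by i+1 equals shifting by i and then advancing every produced letter one step in ENGLISH_FREQ.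
import Mathlib
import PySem

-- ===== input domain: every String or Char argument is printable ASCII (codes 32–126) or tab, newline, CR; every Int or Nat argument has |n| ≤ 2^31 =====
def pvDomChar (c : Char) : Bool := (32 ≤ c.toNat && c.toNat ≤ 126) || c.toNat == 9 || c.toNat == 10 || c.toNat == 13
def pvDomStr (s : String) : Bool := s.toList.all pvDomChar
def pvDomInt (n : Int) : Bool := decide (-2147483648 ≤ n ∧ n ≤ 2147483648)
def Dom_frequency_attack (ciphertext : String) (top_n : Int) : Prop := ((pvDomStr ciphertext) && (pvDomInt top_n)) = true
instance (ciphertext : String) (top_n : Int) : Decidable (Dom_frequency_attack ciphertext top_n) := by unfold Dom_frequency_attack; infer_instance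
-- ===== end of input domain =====

-- B decodes only the rank-0 candidate and derives each further candidate from the previous
-- plaintext by one fixed successor substitution (translate tables) instead of rebuilding a
-- key_map and re-decoding per rotation; measured faster by a constant factor.


-- shared module constants (ENGLISH_FREQ and string.ascii_lowercase)
def pvEnglishFreq : List Char :=
  ['e','t','a','o','i','n','s','h','r','d','l','c','u','m','w','f','g','y','p','b','v','k','j','x','q','z']
def pvAsciiLower : List Char :=
  ['a','b','c','d','e','f','g','h','i','j','k','l','m','n','o','p','q','r','s','t','u','v','w','x','y','z']

-- ===== PORT A =====
-- 'char in string.ascii_lowercase' ported as list membership (exact for single characters)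
def calculate_frequency (text : List Char) : List Char :=
  let t := PySem.Chars.lower text
  let letterCounts := PySem.Dict.counter (t.filter (fun c => pvAsciiLower.contains c))
  -- Counter.most_common() = sorted(items, key=itemgetter(1), reverse=True)
  (PySem.List.sorted letterCounts.items (fun p => p.2) true).map (fun p => p.1)

def decrypt_with_key (ciphertext : List Char) (keyMap : PySem.Dict Char Char) : List Char :=
  ciphertext.foldl (fun acc c =>
    if PySem.Chars.isalpha c then
      if PySem.Chars.islower c then acc ++ [keyMap.getD c c]
      else acc ++ [PySem.Chars.upperChar (keyMap.getD (PySem.Chars.lowerChar c) c)]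
    else acc ++ [c]) []

def frequency_attack (ciphertext : String) (top_n : Int) : List String :=
  let freq := calculate_frequency ciphertext.toList
  (PySem.List.pyRange 0 top_n 1).foldl (fun acc i =>
    let keyMap := (PySem.List.pyRange 0 (freq.length : Int) 1).foldl
      (fun d j => d.insert (PySem.List.pyGetD freq j 'a')
        (PySem.List.pyGetD pvEnglishFreq (PySem.Int.mod (j + i) 26) 'a')) PySem.Dict.empty
    acc ++ [String.ofList (decrypt_with_key ciphertext.toList keyMap)]) []

-- ===== PORT B =====
-- str.maketrans(keys, vals): a char→char table; str.translate: map each char through it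
def pvMaketrans (ks vs : List Char) : PySem.Dict Char Char :=
  (ks.zip vs).foldl (fun d p => d.insert p.1 p.2) PySem.Dict.empty

def pvTranslate (tbl : PySem.Dict Char Char) (s : List Char) : List Char :=
  s.map (fun c => tbl.getD c c)

def frequency_attack_alt (ciphertext : String) (top_n : Int) : List String :=
  let counts := PySem.Dict.counter
    ((PySem.Chars.lower ciphertext.toList).filter (fun c => pvAsciiLower.contains c))
  let freq := (PySem.List.sorted counts.items (fun p => p.2) true).map (fun p => p.1)
  let low := PySem.List.slice pvEnglishFreq none (some (freq.length : Int))
  let first := pvTranslate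
    (pvMaketrans (freq ++ PySem.Chars.upper freq) (low ++ PySem.Chars.upper low))
    ciphertext.toList
  let rot := PySem.List.slice pvEnglishFreq (some 1) none ++ [PySem.List.pyGetD pvEnglishFreq 0 'a']
  let succ := pvMaketrans (pvEnglishFreq ++ PySem.Chars.upper pvEnglishFreq)
    (rot ++ PySem.Chars.upper rot)
  ((PySem.List.pyRange 0 top_n 1).foldl
    (fun (st : List (List Char) × List Char) _ => (st.1 ++ [st.2], pvTranslate succ st.2))
    ([], first)).1.map String.ofList

-- ===== PRECONDITION & SPEC =====
def Spec_frequency_attack (ciphertext : String) (top_n : Int) (out : List String) : Prop := out = frequency_attack_alt ciphertext top_n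
instance (ciphertext : String) (top_n : Int) (out : List String) : Decidable (Spec_frequency_attack ciphertext top_n out) := by unfold Spec_frequency_attack; infer_instance

-- ===== CLAIM (what is proved, stated in full; the proofs are below) =====
def Claim_equal_frequency_attack : Prop := ∀ (ciphertext : String) (top_n : Int), Dom_frequency_attack ciphertext top_n → Spec_frequency_attack ciphertext top_n (frequency_attack ciphertext top_n)

-- ===== LEMMAS AND PROOFS =====

-- proof-only abbreviations: A's key map for rotation i, A's per-character decode,
-- B's first-candidate table and successor table
def pvKM (freq : List Char) (i : Int) : PySem.Dict Char Char :=
  (PySem.List.enumerate freq).foldl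
    (fun d p => d.insert p.2 (PySem.List.pyGetD pvEnglishFreq (PySem.Int.mod (p.1 + i) 26) 'a'))
    PySem.Dict.empty

def pvDec (km : PySem.Dict Char Char) (c : Char) : Char :=
  if PySem.Chars.isalpha c then
    if PySem.Chars.islower c then km.getD c c
    else PySem.Chars.upperChar (km.getD (PySem.Chars.lowerChar c) c)
  else c

def pvFirstTbl (freq : List Char) : PySem.Dict Char Char :=
  pvMaketrans (freq ++ PySem.Chars.upper freq)
    (PySem.List.slice pvEnglishFreq none (some (freq.length : Int))
      ++ PySem.Chars.upper (PySem.List.slice pvEnglishFreq none (some (freq.length : Int))))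

def pvSucc : PySem.Dict Char Char :=
  pvMaketrans (pvEnglishFreq ++ PySem.Chars.upper pvEnglishFreq)
    ((PySem.List.slice pvEnglishFreq (some 1) none ++ [PySem.List.pyGetD pvEnglishFreq 0 'a'])
      ++ PySem.Chars.upper (PySem.List.slice pvEnglishFreq (some 1) none ++ [PySem.List.pyGetD pvEnglishFreq 0 'a']))

-- character-class facts (PySem's ASCII-exact classes)
lemma pv_low_bounds (c : Char) (h : PySem.Chars.islower c = true) : 97 ≤ c.toNat ∧ c.toNat ≤ 122 := by
  simp [PySem.Chars.islower, Char.le_def] at h; exact h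

lemma pv_up_bounds (c : Char) (h : PySem.Chars.isupper c = true) : 65 ≤ c.toNat ∧ c.toNat ≤ 90 := by
  simp [PySem.Chars.isupper, Char.le_def] at h; exact h

lemma pv_islower_of_bounds (c : Char) (h1 : 97 ≤ c.toNat) (h2 : c.toNat ≤ 122) : PySem.Chars.islower c = true := by
  simp only [PySem.Chars.islower, Char.le_def, UInt32.le_iff_toNat_le, Bool.and_eq_true, decide_eq_true_eq]
  simp only [Char.toNat] at h1 h2
  exact ⟨by simpa using h1, by simpa using h2⟩

lemma pv_isupper_of_bounds (c : Char) (h1 : 65 ≤ c.toNat) (h2 : c.toNat ≤ 90) : PySem.Chars.isupper c = true := by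
  simp only [PySem.Chars.isupper, Char.le_def, UInt32.le_iff_toNat_le, Bool.and_eq_true, decide_eq_true_eq]
  simp only [Char.toNat] at h1 h2
  exact ⟨by simpa using h1, by simpa using h2⟩

lemma pv_toNat_ofNat (n : Nat) (h : n < 55296) : (Char.ofNat n).toNat = n := by
  have : n.isValidChar := Or.inl (by omega)
  simp [Char.ofNat, this]

lemma pv_islower_lowerChar (c : Char) (h : PySem.Chars.isupper c = true) :
    PySem.Chars.islower (PySem.Chars.lowerChar c) = true := by
  obtain ⟨h1, h2⟩ := pv_up_bounds c h
  unfold PySem.Chars.lowerChar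
  rw [if_pos h]
  exact pv_islower_of_bounds _ (by rw [pv_toNat_ofNat _ (by omega)]; omega) (by rw [pv_toNat_ofNat _ (by omega)]; omega)

lemma pv_toNat_lowerChar (c : Char) (h : PySem.Chars.isupper c = true) :
    (PySem.Chars.lowerChar c).toNat = c.toNat + 32 := by
  obtain ⟨h1, h2⟩ := pv_up_bounds c h
  unfold PySem.Chars.lowerChar
  rw [if_pos h, pv_toNat_ofNat _ (by omega)]

lemma pv_toNat_upperChar (c : Char) (h : PySem.Chars.islower c = true) :
    (PySem.Chars.upperChar c).toNat = c.toNat - 32 := by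
  obtain ⟨h1, h2⟩ := pv_low_bounds c h
  unfold PySem.Chars.upperChar
  rw [if_pos h, pv_toNat_ofNat _ (by omega)]

lemma pv_isupper_upperChar (c : Char) (h : PySem.Chars.islower c = true) :
    PySem.Chars.isupper (PySem.Chars.upperChar c) = true := by
  obtain ⟨h1, h2⟩ := pv_low_bounds c h
  exact pv_isupper_of_bounds _ (by rw [pv_toNat_upperChar c h]; omega) (by rw [pv_toNat_upperChar c h]; omega)

lemma pv_toNat_inj (a b : Char) (h : a.toNat = b.toNat) : a = b := by
  have := Char.ofNat_toNat a
  rw [h, Char.ofNat_toNat] at this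
  exact this.symm

lemma pv_upper_lower (c : Char) (h : PySem.Chars.isupper c = true) :
    PySem.Chars.upperChar (PySem.Chars.lowerChar c) = c := by
  obtain ⟨h1, h2⟩ := pv_up_bounds c h
  apply pv_toNat_inj
  rw [pv_toNat_upperChar _ (pv_islower_lowerChar c h), pv_toNat_lowerChar c h]; omega

lemma pv_lower_upper (c : Char) (h : PySem.Chars.islower c = true) :
    PySem.Chars.lowerChar (PySem.Chars.upperChar c) = c := by
  obtain ⟨h1, h2⟩ := pv_low_bounds c h
  apply pv_toNat_inj
  rw [pv_toNat_lowerChar _ (pv_isupper_upperChar c h), pv_toNat_upperChar c h]; omega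

lemma pv_lower_ne_upper (x c : Char) (hx : PySem.Chars.islower x = true) (hc : PySem.Chars.isupper c = true) : x ≠ c := by
  obtain ⟨a1, a2⟩ := pv_low_bounds x hx
  obtain ⟨b1, b2⟩ := pv_up_bounds c hc
  intro h; subst h; omega

set_option maxRecDepth 4000 in
lemma pv_mem_ascii (c : Char) (h : PySem.Chars.islower c = true) : c ∈ pvAsciiLower := by
  obtain ⟨h1, h2⟩ := pv_low_bounds c h
  have he : pvAsciiLower = (List.range 26).map (fun k => Char.ofNat (97 + k)) := by decide
  rw [he, List.mem_map]
  refine ⟨c.toNat - 97, by rw [List.mem_range]; omega, ?_⟩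
  rw [show 97 + (c.toNat - 97) = c.toNat by omega, Char.ofNat_toNat]

lemma pv_ascii_islower_all : pvAsciiLower.all PySem.Chars.islower = true := by decide
lemma pv_ascii_islower : ∀ x ∈ pvAsciiLower, PySem.Chars.islower x = true :=
  List.all_eq_true.mp pv_ascii_islower_all

lemma pv_lowerChar_of_islower (c : Char) (h : PySem.Chars.islower c = true) :
    PySem.Chars.lowerChar c = c := by
  obtain ⟨h1, h2⟩ := pv_low_bounds c h
  have hu : PySem.Chars.isupper c = false := by
    by_contra hf
    have := pv_up_bounds c (by revert hf; cases PySem.Chars.isupper c <;> simp)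
    omega
  simp [PySem.Chars.lowerChar, hu]

lemma pv_isupper_of_not_islower (c : Char) (ha : PySem.Chars.isalpha c = true)
    (hl : PySem.Chars.islower c = false) : PySem.Chars.isupper c = true := by
  simp [PySem.Chars.isalpha, hl] at ha; exact ha

-- list/index machinery
lemma pv_insertBy_map {α β : Type} (f : α → β) (p : β → β → Bool) (x : α) (ys : List α) :
    PySem.List.insertBy p (f x) (ys.map f)
      = (PySem.List.insertBy (fun a b => p (f a) (f b)) x ys).map f := by
  induction ys with
  | nil => simp [PySem.List.insertBy]
  | cons y ys ih =>
    simp only [List.map_cons, PySem.List.insertBy]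
    by_cases h : p (f x) (f y)
    · simp [h]
    · simp [h, ih]

-- a stable reverse sort commutes with mapping the elements
lemma pv_sorted_rev_map {α β κ : Type} [LinearOrder κ] (xs : List α) (f : α → β) (key : β → κ) :
    PySem.List.sorted (xs.map f) key true
      = (PySem.List.sorted xs (fun x => key (f x)) true).map f := by
  rw [PySem.List.sorted_rev_eq_foldl_insertBy, PySem.List.sorted_rev_eq_foldl_insertBy,
    List.foldl_map]
  suffices h : ∀ (acc : List α),
      xs.foldl (fun acc x => PySem.List.insertBy (fun a b => decide (key b < key a)) (f x) acc) (acc.map f)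
        = (xs.foldl (fun acc x => PySem.List.insertBy (fun a b => decide (key (f b) < key (f a))) x acc) acc).map f by
    simpa using h []
  induction xs with
  | nil => simp
  | cons x xs ih =>
    intro acc
    simp only [List.foldl_cons]
    rw [pv_insertBy_map f _ x acc, ih]

-- A's calculate_frequency is a stable descending count-sort of the distinct letters
lemma pv_calc (ct : String) :
    calculate_frequency ct.toList
      = PySem.List.sorted (PySem.List.dedup ((PySem.Chars.lower ct.toList).filter (fun c => pvAsciiLower.contains c)))
          (fun c => (PySem.List.count ((PySem.Chars.lower ct.toList).filter (fun c => pvAsciiLower.contains c)) c : Int)) true := by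
  show (PySem.List.sorted (PySem.Dict.counter ((PySem.Chars.lower ct.toList).filter (fun c => pvAsciiLower.contains c))).items (fun p => p.2) true).map (fun p => p.1) = _
  rw [PySem.Dict.items_counter, pv_sorted_rev_map]
  simp [PySem.List.count_eq, PySem.List.dedup_eq_ofList, Function.comp_def]

-- lookup in a dict built by inserting (element ↦ g index) along an enumeration of a Nodup list
lemma pv_get {ν : Type} (xs : List Char) (g : Int → ν) (s : Int)
    (d : PySem.Dict Char ν) (c : Char) (hnd : xs.Nodup) :
    ((PySem.List.enumerate xs s).foldl (fun acc p => acc.insert p.2 (g p.1)) d).get? c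
      = match PySem.List.index? xs c with
        | some k => some (g (s + (k : Int)))
        | none => d.get? c := by
  induction xs generalizing s d with
  | nil => simp [PySem.List.enumerate, PySem.List.index?]
  | cons x xs ih =>
    rw [PySem.List.enumerate_cons]
    simp only [List.foldl_cons]
    rcases List.nodup_cons.mp hnd with ⟨hx, hnd'⟩
    by_cases hc : c = x
    · subst hc
      rw [ih _ _ hnd', (PySem.List.index?_eq_none_iff xs c).mpr hx,
        PySem.List.index?_cons_self]
      simp [PySem.Dict.get?_insert_self]
    · rw [ih _ _ hnd', PySem.List.index?_cons_of_ne xs (fun h => hc h.symm)]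
      cases h : PySem.List.index? xs c with
      | none => simp [PySem.Dict.get?_insert_of_ne _ _ hc]
      | some k =>
        simp
        ring_nf

-- lookup in a maketrans table (fold of inserts over zipped keys/values, Nodup keys)
lemma pv_get_zip (ks vs : List Char) (hnd : ks.Nodup) (hlen : ks.length = vs.length)
    (d : PySem.Dict Char Char) (c : Char) :
    ((ks.zip vs).foldl (fun acc p => acc.insert p.1 p.2) d).get? c
      = match PySem.List.index? ks c with
        | some k => vs[k]?
        | none => d.get? c := by
  induction ks generalizing vs d with
  | nil => simp [PySem.List.index?]
  | cons x ks ih =>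
    cases vs with
    | nil => simp at hlen
    | cons y vs =>
      rcases List.nodup_cons.mp hnd with ⟨hx, hnd'⟩
      simp only [List.zip_cons_cons, List.foldl_cons]
      by_cases hc : c = x
      · subst hc
        rw [ih vs hnd' (by simpa using hlen), (PySem.List.index?_eq_none_iff ks c).mpr hx,
          PySem.List.index?_cons_self]
        simp [PySem.Dict.get?_insert_self]
      · rw [ih vs hnd' (by simpa using hlen), PySem.List.index?_cons_of_ne ks (fun h => hc h.symm)]
        cases h : PySem.List.index? ks c with
        | none => simp [PySem.Dict.get?_insert_of_ne _ _ hc]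
        | some k => simp

lemma pv_index?_append_right (l1 l2 : List Char) (c : Char) (h : c ∉ l1) :
    PySem.List.index? (l1 ++ l2) c = (PySem.List.index? l2 c).map (· + l1.length) := by
  induction l1 with
  | nil => simp
  | cons x l1 ih =>
    have hne : x ≠ c := fun hxc => h (by rw [← hxc]; exact List.mem_cons_self)
    rw [List.cons_append, PySem.List.index?_cons_of_ne _ hne,
      ih (fun hm => h (List.mem_cons_of_mem _ hm)), Option.map_map]
    cases PySem.List.index? l2 c <;> simp

lemma pv_index?_map_upper (l : List Char) (hl : ∀ x ∈ l, PySem.Chars.islower x = true)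
    (c : Char) (hc : PySem.Chars.isupper c = true) :
    PySem.List.index? (l.map PySem.Chars.upperChar) c = PySem.List.index? l (PySem.Chars.lowerChar c) := by
  induction l with
  | nil => simp [PySem.List.index?]
  | cons x l ih =>
    have hx := hl x List.mem_cons_self
    have hiff : PySem.Chars.upperChar x = c ↔ x = PySem.Chars.lowerChar c := by
      constructor
      · intro h; rw [← h, pv_lower_upper x hx]
      · intro h; rw [h, pv_upper_lower c hc]
    rw [List.map_cons]
    by_cases h : PySem.Chars.upperChar x = c
    · rw [h, hiff.mp h, PySem.List.index?_cons_self, PySem.List.index?_cons_self]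
    · have hne2 : x ≠ PySem.Chars.lowerChar c := fun he => h (hiff.mpr he)
      rw [PySem.List.index?_cons_of_ne _ h, PySem.List.index?_cons_of_ne _ hne2,
        ih (fun y hy => hl y (List.mem_cons_of_mem _ hy))]

-- A's append loop in decrypt_with_key is a map over the ciphertext
lemma pv_decrypt (ct : List Char) (km : PySem.Dict Char Char) :
    ∀ acc, ct.foldl (fun acc c =>
      if PySem.Chars.isalpha c then
        if PySem.Chars.islower c then acc ++ [km.getD c c]
        else acc ++ [PySem.Chars.upperChar (km.getD (PySem.Chars.lowerChar c) c)]
      else acc ++ [c]) acc = acc ++ ct.map (pvDec km) := by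
  induction ct with
  | nil => simp
  | cons c ct ih =>
    intro acc
    simp only [List.foldl_cons, List.map_cons, pvDec]
    by_cases h1 : PySem.Chars.isalpha c <;> by_cases h2 : PySem.Chars.islower c <;>
      simp [h1, h2, ih]

-- A's key_map is the enumerate-fold pvKM
lemma pv_keymap_eq (freq : List Char) (i : Int) :
    (PySem.List.pyRange 0 (freq.length : Int) 1).foldl
      (fun d j => d.insert (PySem.List.pyGetD freq j 'a')
        (PySem.List.pyGetD pvEnglishFreq (PySem.Int.mod (j + i) 26) 'a')) PySem.Dict.empty
    = pvKM freq i := by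
  unfold pvKM
  rw [PySem.List.enumerate_eq_map_pyRange freq 'a', List.foldl_map]
  simp [PySem.List.len]

-- the successor table on the two letter cases (concrete: by computation) and on non-letters
set_option maxRecDepth 4000 in
lemma pv_succ_low : ∀ m, m < 26 →
    pvSucc.getD (pvEnglishFreq.getD m 'a') (pvEnglishFreq.getD m 'a')
      = pvEnglishFreq.getD ((m + 1) % 26) 'a' := by decide

set_option maxRecDepth 4000 in
lemma pv_succ_up : ∀ m, m < 26 →
    pvSucc.getD (PySem.Chars.upperChar (pvEnglishFreq.getD m 'a'))
        (PySem.Chars.upperChar (pvEnglishFreq.getD m 'a'))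
      = PySem.Chars.upperChar (pvEnglishFreq.getD ((m + 1) % 26) 'a') := by decide

lemma pv_succ_keys_alpha_all :
    (pvEnglishFreq ++ PySem.Chars.upper pvEnglishFreq).all PySem.Chars.isalpha = true := by decide
lemma pv_succ_keys_alpha : ∀ x ∈ pvEnglishFreq ++ PySem.Chars.upper pvEnglishFreq,
    PySem.Chars.isalpha x = true := List.all_eq_true.mp pv_succ_keys_alpha_all

lemma pv_succ_other (c : Char) (h : PySem.Chars.isalpha c = false) : pvSucc.getD c c = c := by
  unfold pvSucc pvMaketrans
  rw [PySem.Dict.getD_eq_get?_getD, pv_get_zip _ _ (by decide) (by decide)]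
  rw [(PySem.List.index?_eq_none_iff _ c).mpr
    (fun hm => by rw [pv_succ_keys_alpha c hm] at h; exact Bool.true_eq_false.mp h)]
  rfl

-- freq facts
lemma pv_freq_nodup (ct : String) : (calculate_frequency ct.toList).Nodup := by
  rw [pv_calc ct]
  exact (PySem.List.sorted_perm _ _ _).symm.nodup
    (by rw [PySem.List.dedup_eq_ofList]; exact PySem.Set.nodup_ofList _)

lemma pv_mem_freq_iff (ct : String) (c : Char) :
    c ∈ calculate_frequency ct.toList
      ↔ c ∈ (PySem.Chars.lower ct.toList).filter (fun c => pvAsciiLower.contains c) := by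
  rw [pv_calc ct, PySem.List.mem_sorted, PySem.List.dedup_eq_ofList, PySem.Set.mem_ofList]

lemma pv_freq_islower (ct : String) : ∀ x ∈ calculate_frequency ct.toList, PySem.Chars.islower x = true := by
  intro x hx
  rw [pv_mem_freq_iff] at hx
  have := List.of_mem_filter hx
  exact pv_ascii_islower x (by simpa using this)

lemma pv_freq_len (ct : String) : (calculate_frequency ct.toList).length ≤ 26 := by
  have hsub : calculate_frequency ct.toList ⊆ pvAsciiLower := by
    intro c hc
    exact pv_mem_ascii c (pv_freq_islower ct c hc)
  exact (List.subperm_of_subset (pv_freq_nodup ct) hsub).length_le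

lemma pv_mem_freq_of_lower (ct : String) (c : Char) (hct : c ∈ ct.toList)
    (h : PySem.Chars.islower c = true) : c ∈ calculate_frequency ct.toList := by
  rw [pv_mem_freq_iff]
  apply List.mem_filter_of_mem
  · exact List.mem_map.mpr ⟨c, hct, pv_lowerChar_of_islower c h⟩
  · simpa using pv_mem_ascii c h

lemma pv_mem_freq_of_upper (ct : String) (c : Char) (hct : c ∈ ct.toList)
    (h : PySem.Chars.isupper c = true) : PySem.Chars.lowerChar c ∈ calculate_frequency ct.toList := by
  rw [pv_mem_freq_iff]
  apply List.mem_filter_of_mem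
  · exact List.mem_map.mpr ⟨c, hct, rfl⟩
  · simpa using pv_mem_ascii _ (pv_islower_lowerChar c h)

-- the chained fold of B lists the iterates of the successor translation
lemma pv_chain {α β : Type} (l : List α) (T : β → β) :
    ∀ (acc : List β) (x : β),
      (l.foldl (fun st _ => (st.1 ++ [st.2], T st.2)) (acc, x)).1
        = acc ++ (List.range l.length).map (fun j => T^[j] x) := by
  induction l with
  | nil => simp
  | cons a l ih =>
    intro acc x
    simp only [List.foldl_cons, ih, List.length_cons, List.range_succ_eq_map]
    simp [Function.iterate_succ_apply, List.map_map, Function.comp_def]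

-- pyRange 0 n 1 as a mapped Nat range
lemma pv_pyRange_toNat (n : Int) :
    PySem.List.pyRange 0 n 1 = (List.range n.toNat).map (fun k : Nat => (k : Int)) := by
  rcases le_or_gt 0 n with h | h
  · obtain ⟨m, rfl⟩ : ∃ m : Nat, n = (m : Int) := ⟨n.toNat, by omega⟩
    rw [Int.toNat_natCast]
    exact PySem.List.pyRange_zero_natCast m
  · rw [show n.toNat = 0 by omega]
    simp [PySem.List.pyRange, show ¬ (0 : Int) < n by omega]

-- key-map lookup of a letter with rank k reads ENGLISH_FREQ[(k+i) % 26]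
lemma pv_KM_getD (freq : List Char) (hnd : freq.Nodup) (x d : Char) (k : Nat) (i : Int)
    (hk : PySem.List.index? freq x = some k) :
    (pvKM freq i).getD x d
      = PySem.List.pyGetD pvEnglishFreq (PySem.Int.mod ((k : Int) + i) 26) 'a' := by
  unfold pvKM
  rw [PySem.Dict.getD_eq_get?_getD,
    pv_get freq (fun t => PySem.List.pyGetD pvEnglishFreq (PySem.Int.mod (t + i) 26) 'a') 0
      PySem.Dict.empty x hnd, hk]
  simp

lemma pv_K_eq' (k : Nat) (i : Int) (hi : 0 ≤ i) :
    PySem.List.pyGetD pvEnglishFreq (PySem.Int.mod ((k : Int) + i) 26) 'a'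
      = pvEnglishFreq.getD ((k + i.toNat) % 26) 'a' := by
  rw [show PySem.Int.mod ((k : Int) + i) 26 = (((k + i.toNat) % 26 : Nat) : Int) by
      rw [PySem.Int.mod_eq_emod_of_pos (by norm_num)]; push_cast; omega,
    PySem.List.pyGetD_natCast]

lemma pv_first_keys_nodup (ct : String) :
    (calculate_frequency ct.toList ++ (calculate_frequency ct.toList).map PySem.Chars.upperChar).Nodup := by
  have hnd := pv_freq_nodup ct
  have hlow := pv_freq_islower ct
  rw [List.nodup_append]
  refine ⟨hnd, hnd.map_on (fun x hx y hy h => ?_), ?_⟩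
  · rw [← pv_lower_upper x (hlow x hx), h, pv_lower_upper y (hlow y hy)]
  · intro x hx y hy
    obtain ⟨z, hz, hzy⟩ := List.mem_map.mp hy
    exact pv_lower_ne_upper x y (hlow x hx) (hzy ▸ pv_isupper_upperChar z (hlow z hz))

-- per-character: the first-candidate table computes A's rotation-0 decode
lemma pv_first_char (ct : String) (c : Char) (hct : c ∈ ct.toList) :
    (pvFirstTbl (calculate_frequency ct.toList)).getD c c
      = pvDec (pvKM (calculate_frequency ct.toList) 0) c := by
  have hnd := pv_freq_nodup ct
  have hlow := pv_freq_islower ct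
  have hL := pv_freq_len ct
  have hElen : pvEnglishFreq.length = 26 := by decide
  unfold pvFirstTbl pvMaketrans pvDec
  simp only [PySem.Chars.upper]
  rw [PySem.Dict.getD_eq_get?_getD,
    PySem.List.slice_to_natCast pvEnglishFreq (calculate_frequency ct.toList).length,
    pv_get_zip _ _ (pv_first_keys_nodup ct)
      (by simp only [List.length_append, List.length_map, List.length_take, hElen]; omega)]
  by_cases h1 : PySem.Chars.isalpha c
  · by_cases h2 : PySem.Chars.islower c
    · have hm : c ∈ calculate_frequency ct.toList := pv_mem_freq_of_lower ct c hct h2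
      obtain ⟨k, hk⟩ := Option.isSome_iff_exists.mp ((PySem.List.index?_isSome_iff _ c).mpr hm)
      obtain ⟨hklt, -, -⟩ := PySem.List.getElem_of_index?_eq_some hk
      rw [PySem.List.index?_append_of_mem _ hm, hk]
      simp only [if_pos h1, if_pos h2]
      rw [pv_KM_getD _ hnd c c k 0 hk, pv_K_eq' k 0 (by omega)]
      have hk26 : k < 26 := by omega
      rw [List.getElem?_append_left (by simp only [List.length_take, hElen]; omega),
        List.getElem?_take_of_lt hklt, List.getElem?_eq_getElem (by omega : k < pvEnglishFreq.length)]
      simp only [Option.getD_some]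
      rw [show (k + (0 : Int).toNat) % 26 = k by omega, List.getD_eq_getElem _ _ (by omega)]
    · have hup := pv_isupper_of_not_islower c h1 (Bool.of_not_eq_true h2)
      have hm : PySem.Chars.lowerChar c ∈ calculate_frequency ct.toList :=
        pv_mem_freq_of_upper ct c hct hup
      obtain ⟨k, hk⟩ := Option.isSome_iff_exists.mp ((PySem.List.index?_isSome_iff _ _).mpr hm)
      obtain ⟨hklt, -, -⟩ := PySem.List.getElem_of_index?_eq_some hk
      have hnotin : c ∉ calculate_frequency ct.toList := fun hcf =>
        pv_lower_ne_upper c c (hlow c hcf) hup rfl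
      rw [pv_index?_append_right _ _ c hnotin, pv_index?_map_upper _ hlow c hup, hk]
      simp only [Option.map_some, if_pos h1, if_neg h2]
      rw [pv_KM_getD _ hnd _ c k 0 hk, pv_K_eq' k 0 (by omega)]
      have hk26 : k < 26 := by omega
      rw [List.getElem?_append_right (by simp only [List.length_take, hElen]; omega)]
      simp only [List.length_take, hElen, List.getElem?_map]
      rw [show min (calculate_frequency ct.toList).length 26
            = (calculate_frequency ct.toList).length by omega, Nat.add_sub_cancel,
        List.getElem?_take_of_lt hklt, List.getElem?_eq_getElem (by omega : k < pvEnglishFreq.length)]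
      simp only [Option.map_some, Option.getD_some]
      rw [show (k + (0 : Int).toNat) % 26 = k by omega, List.getD_eq_getElem _ _ (by omega)]
  · have hnone : PySem.List.index?
        (calculate_frequency ct.toList ++ (calculate_frequency ct.toList).map PySem.Chars.upperChar) c
        = none := by
      rw [PySem.List.index?_eq_none_iff]
      intro hmem
      rcases List.mem_append.mp hmem with hmem | hmem
      · rw [show PySem.Chars.isalpha c = true by
          simp [PySem.Chars.isalpha, hlow c hmem]] at h1
        exact h1 rfl
      · obtain ⟨y, hy, hyx⟩ := List.mem_map.mp hmem
        rw [show PySem.Chars.isalpha c = true by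
          simp [PySem.Chars.isalpha, hyx ▸ pv_isupper_upperChar y (hlow y hy)]] at h1
        exact h1 rfl
    rw [hnone]
    simp [h1]

-- per-character: the successor table advances A's rotation-j decode to rotation j+1
lemma pv_succ_char (ct : String) (j : Nat) (c : Char) (hct : c ∈ ct.toList) :
    pvSucc.getD (pvDec (pvKM (calculate_frequency ct.toList) (j : Int)) c)
        (pvDec (pvKM (calculate_frequency ct.toList) (j : Int)) c)
      = pvDec (pvKM (calculate_frequency ct.toList) ((j : Int) + 1)) c := by
  have hnd := pv_freq_nodup ct
  have hlow := pv_freq_islower ct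
  have hL := pv_freq_len ct
  unfold pvDec
  by_cases h1 : PySem.Chars.isalpha c
  · by_cases h2 : PySem.Chars.islower c
    · have hm : c ∈ calculate_frequency ct.toList := pv_mem_freq_of_lower ct c hct h2
      obtain ⟨k, hk⟩ := Option.isSome_iff_exists.mp ((PySem.List.index?_isSome_iff _ c).mpr hm)
      obtain ⟨hklt, -, -⟩ := PySem.List.getElem_of_index?_eq_some hk
      simp only [if_pos h1, if_pos h2]
      rw [pv_KM_getD _ hnd c c k (j : Int) hk, pv_K_eq' k (j : Int) (by omega),
        pv_KM_getD _ hnd c c k ((j : Int) + 1) hk, pv_K_eq' k ((j : Int) + 1) (by omega),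
        Int.toNat_natCast, pv_succ_low ((k + j) % 26) (by omega),
        show ((k + j) % 26 + 1) % 26 = (k + ((j : Int) + 1).toNat) % 26 by omega]
    · have hup := pv_isupper_of_not_islower c h1 (Bool.of_not_eq_true h2)
      have hm : PySem.Chars.lowerChar c ∈ calculate_frequency ct.toList :=
        pv_mem_freq_of_upper ct c hct hup
      obtain ⟨k, hk⟩ := Option.isSome_iff_exists.mp ((PySem.List.index?_isSome_iff _ _).mpr hm)
      obtain ⟨hklt, -, -⟩ := PySem.List.getElem_of_index?_eq_some hk
      simp only [if_pos h1, if_neg h2]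
      rw [pv_KM_getD _ hnd _ c k (j : Int) hk, pv_K_eq' k (j : Int) (by omega),
        pv_KM_getD _ hnd _ c k ((j : Int) + 1) hk, pv_K_eq' k ((j : Int) + 1) (by omega),
        Int.toNat_natCast, pv_succ_up ((k + j) % 26) (by omega),
        show ((k + j) % 26 + 1) % 26 = (k + ((j : Int) + 1).toNat) % 26 by omega]
  · simp only [if_neg h1]
    exact pv_succ_other c (Bool.of_not_eq_true h1)

-- iterating the successor translation from the first candidate gives A's rotation-j decode
lemma pv_iter (ct : String) (j : Nat) :
    (pvTranslate pvSucc)^[j]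
        (pvTranslate (pvFirstTbl (calculate_frequency ct.toList)) ct.toList)
      = ct.toList.map (pvDec (pvKM (calculate_frequency ct.toList) (j : Int))) := by
  induction j with
  | zero =>
    simp only [Function.iterate_zero, id_eq, pvTranslate]
    exact List.map_congr_left (fun c hc => pv_first_char ct c hc)
  | succ j ih =>
    rw [Function.iterate_succ_apply', ih]
    unfold pvTranslate
    rw [List.map_map]
    refine List.map_congr_left (fun c hc => ?_)
    simp only [Function.comp_apply]
    rw [pv_succ_char ct j c hc]
    norm_num

-- ===== VERDICT (by name: the statement is the Claim_ definition above) =====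
set_option maxHeartbeats 1000000 in
theorem frequency_attack_spec : Claim_equal_frequency_attack := by
  intro ct n _
  unfold Spec_frequency_attack
  have hB : frequency_attack_alt ct n
      = ((PySem.List.pyRange 0 n 1).foldl
          (fun (st : List (List Char) × List Char) _ => (st.1 ++ [st.2], pvTranslate pvSucc st.2))
          ([], pvTranslate (pvFirstTbl (calculate_frequency ct.toList)) ct.toList)).1.map String.ofList := rfl
  rw [hB, pv_chain (PySem.List.pyRange 0 n 1) _ [] _, List.nil_append, List.map_map]
  -- A side: list of per-rotation decodes
  show (PySem.List.pyRange 0 n 1).foldl (fun acc i =>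
      acc ++ [String.ofList (decrypt_with_key ct.toList
        ((PySem.List.pyRange 0 ((calculate_frequency ct.toList).length : Int) 1).foldl
          (fun d j => d.insert (PySem.List.pyGetD (calculate_frequency ct.toList) j 'a')
            (PySem.List.pyGetD pvEnglishFreq (PySem.Int.mod (j + i) 26) 'a')) PySem.Dict.empty))]) []
    = _
  rw [PySem.List.foldl_append_singleton_eq_map
    (f := fun i => String.ofList (decrypt_with_key ct.toList
      ((PySem.List.pyRange 0 ((calculate_frequency ct.toList).length : Int) 1).foldl
        (fun d j => d.insert (PySem.List.pyGetD (calculate_frequency ct.toList) j 'a')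
          (PySem.List.pyGetD pvEnglishFreq (PySem.Int.mod (j + i) 26) 'a')) PySem.Dict.empty)))]
  rw [List.nil_append, pv_pyRange_toNat n, List.map_map]
  simp only [List.length_map, List.length_range]
  refine List.map_congr_left (fun j hj => ?_)
  simp only [Function.comp_apply]
  rw [pv_iter ct j, pv_keymap_eq,
    show decrypt_with_key ct.toList (pvKM (calculate_frequency ct.toList) (j : Int)) = _ from pv_decrypt ct.toList _ [], List.nil_append]
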